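-- pv_equiv track=rewrite | github.com/cloudalien2025/brains | Brains_Ingestion_App/adapters/extraction.py | _segment_match
-- ===== SOURCE A (Python) =====
-- from typing import Any
--
-- def _segment_match(assertion: str, segments: list[dict[str, Any]]) -> dict[str, Any] | None:
--     if not segments:
--         return None
--     words = {w.strip(".,:;!?()[]{}\"'").lower() for w in assertion.split() if len(w) > 3}
--     best = None
--     best_score = -1
--     for seg in segments:
--         text = seg.get("text", "").lower()
--         score = sum(1 for w in words if w and w in text)
--         if score > best_score:
--             best_score = score
--             best = seg
--     return best or segments[0]
-- ===== SOURCE B (Python) =====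
-- def _segment_match(assertion: str, segments):
--     if not segments:
--         return None
--     words = {w.strip(".,:;!?()[]{}\"'").lower() for w in assertion.split() if len(w) > 3}
--     words.discard("")
--     lengths = {len(w) for w in words}
--
--     def score(seg):
--         # Sliding-window scan: walk every start position of the text once and
--         # look the window (one per distinct word length) up in the word set,
--         # instead of running a separate substring search per word.
--         text = seg.get("text", "").lower()
--         hit = set()
--         for i in range(len(text) + 1):
--             for L in lengths:
--                 sub = text[i:i + L]
--                 if sub in words:
--                     hit.add(sub)
--         return len(hit)
--
--     best = max(segments, key=score)
--     return best or segments[0]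
-- ===== Notes on version B (the rewrite author's own statement) =====
-- stated objective: alternative
-- what changed: B replaces A's per-word substring search (for each word, 'w in text') by a sliding-window scan: it walks every start position of the text once, slices one window per distinct word length, looks the window up in a hash set of words to collect the distinct matched words, and selects the winner with max(segments, key=score) instead of A's inline best/best_score loop.
import Mathlib
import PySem

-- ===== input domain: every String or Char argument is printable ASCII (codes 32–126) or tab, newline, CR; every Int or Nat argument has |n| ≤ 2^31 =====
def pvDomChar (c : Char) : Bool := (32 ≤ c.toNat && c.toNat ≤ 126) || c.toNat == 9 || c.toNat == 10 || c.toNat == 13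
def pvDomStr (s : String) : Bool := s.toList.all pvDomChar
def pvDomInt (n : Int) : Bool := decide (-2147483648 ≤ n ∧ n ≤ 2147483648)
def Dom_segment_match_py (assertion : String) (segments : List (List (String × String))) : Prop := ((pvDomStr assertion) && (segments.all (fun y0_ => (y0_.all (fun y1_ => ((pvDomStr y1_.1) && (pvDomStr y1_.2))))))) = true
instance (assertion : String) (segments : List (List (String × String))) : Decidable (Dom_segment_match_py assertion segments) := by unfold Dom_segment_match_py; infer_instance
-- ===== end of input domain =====

-- B scores each segment with a sliding-window scan (every start position of the text,
-- one window per distinct word length, looked up in the word set) instead of a substring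
-- search per word, and selects with max(segments, key=score); same return value, proved equal.

-- ===== PORT A =====
-- words = {w.strip(".,:;!?()[]{}\"'").lower() for w in assertion.split() if len(w) > 3}
def pvWords (assertion : String) : PySem.Set String :=
  PySem.Set.ofList
    (((PySem.Str.split₀ assertion).filter (fun w => 3 < PySem.Str.len w)).map
      (fun w => PySem.Str.lower (PySem.Str.stripChars w ".,:;!?()[]{}\"'")))

-- text = seg.get("text", "").lower()
def pvTextOf (seg : List (String × String)) : String :=
  PySem.Str.lower ((PySem.Dict.mk seg).getD "text" "")

def segment_match_py (assertion : String) (segments : List (List (String × String))) : Option (List (String × String)) :=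
  if segments.isEmpty then none
  else
    let words := pvWords assertion
    -- best = None; best_score = -1; for seg in segments: …
    let st : Option (List (String × String)) × Int :=
      segments.foldl
        (fun st seg =>
          let text := pvTextOf seg
          -- score = sum(1 for w in words if w and w in text)  (order-independent over the set)
          let score : Int := (words.countP (fun w => !(w == "") && PySem.Str.isIn w text) : Int)
          if score > st.2 then (some seg, score) else st)
        (none, -1)
    -- return best or segments[0]
    match st.1 with
    | some b => if b.isEmpty then some (PySem.List.pyGetD segments 0 []) else some b
    | none => some (PySem.List.pyGetD segments 0 [])

-- ===== PORT B =====
-- def score(seg): sliding-window scan of the text; consumes the sets only through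
-- membership and len(hit), which are iteration-order independent
def pvScoreB (words : PySem.Set String) (lengths : PySem.Set Int) (seg : List (String × String)) : Int :=
  let text := pvTextOf seg
  let hit : PySem.Set String :=
    (PySem.List.pyRange 0 (PySem.Str.len text + 1) 1).foldl
      (fun h i =>
        lengths.foldl
          (fun h L =>
            let sub := PySem.Str.slice text (some i) (some (i + L))
            if words.contains sub then PySem.Set.add h sub else h)
          h)
      PySem.Set.empty
  (hit.length : Int)

def segment_match_py_alt (assertion : String) (segments : List (List (String × String))) : Option (List (String × String)) :=
  if segments.isEmpty then none
  else
    -- words = {…}; words.discard(""); lengths = {len(w) for w in words}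
    let words := PySem.Set.discard (pvWords assertion) ""
    let lengths : PySem.Set Int := PySem.Set.ofList (words.map PySem.Str.len)
    -- best = max(segments, key=score)  (first maximal element)
    match PySem.List.max? segments (pvScoreB words lengths) with
    | some best => if best.isEmpty then some (PySem.List.pyGetD segments 0 []) else some best
    | none => none

-- ===== PRECONDITION & SPEC =====
def Spec_segment_match_py (assertion : String) (segments : List (List (String × String))) (out : Option (List (String × String))) : Prop := out = segment_match_py_alt assertion segments
instance (assertion : String) (segments : List (List (String × String))) (out : Option (List (String × String))) : Decidable (Spec_segment_match_py assertion segments out) := by unfold Spec_segment_match_py; infer_instance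

-- ===== CLAIM =====
def Claim_equal_segment_match_py : Prop := ∀ (assertion : String) (segments : List (List (String × String))), Dom_segment_match_py assertion segments → Spec_segment_match_py assertion segments (segment_match_py assertion segments)

-- ===== LEMMAS AND PROOFS =====

-- the per-segment score A computes
def pvKey (assertion : String) (seg : List (String × String)) : Int :=
  ((pvWords assertion).countP (fun w => !(w == "") && PySem.Str.isIn w (pvTextOf seg)) : Int)

-- discarding "" from the word set turns A's `if w and w in text` filter into a plain count
theorem pv_count_discard (ws : PySem.Set String) (t : String) :
    ((PySem.Set.discard ws "").countP (fun w => PySem.Str.isIn w t) : Int)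
    = (ws.countP (fun w => !(w == "") && PySem.Str.isIn w t) : Int) := by
  have : (PySem.Set.discard ws "").countP (fun w => PySem.Str.isIn w t)
      = ws.countP (fun w => !(w == "") && PySem.Str.isIn w t) := by
    show (ws.filter (fun w => !(w == ""))).countP (fun w => PySem.Str.isIn w t)
        = ws.countP (fun w => !(w == "") && PySem.Str.isIn w t)
    rw [List.countP_filter]
    congr 1
    funext w
    exact Bool.and_comm _ _
  exact_mod_cast congrArg (Nat.cast (R := Int)) this

-- a fold whose step preserves Nodup preserves Nodup
theorem pv_foldl_nodup {α β : Type} (f : List α → β → List α)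
    (hf : ∀ acc x, acc.Nodup → (f acc x).Nodup) :
    ∀ (l : List β) (acc : List α), acc.Nodup → (l.foldl f acc).Nodup := by
  intro l
  induction l with
  | nil => intro acc h; exact h
  | cons x xs ih => intro acc h; exact ih _ (hf acc x h)

-- membership in the inner (lengths) loop of B's hit set
theorem pv_mem_inner (words : PySem.Set String) (text : String) (i : Int)
    (Ls : List Int) (acc : List String) (y : String) :
    y ∈ Ls.foldl
        (fun h L =>
          let sub := PySem.Str.slice text (some i) (some (i + L))
          if words.contains sub then PySem.Set.add h sub else h)
        acc
    ↔ y ∈ acc ∨ ∃ L ∈ Ls, words.contains (PySem.Str.slice text (some i) (some (i + L))) = true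
          ∧ y = PySem.Str.slice text (some i) (some (i + L)) := by
  induction Ls generalizing acc with
  | nil => simp
  | cons L Ls ih =>
    simp only [List.foldl_cons]
    by_cases hc : words.contains (PySem.Str.slice text (some i) (some (i + L))) = true
    · rw [if_pos hc, ih, PySem.Set.mem_add]
      constructor
      · rintro (⟨h | h⟩ | ⟨L', hL', h1, h2⟩)
        · exact Or.inl h
        · exact Or.inr ⟨L, List.mem_cons_self, hc, h⟩
        · exact Or.inr ⟨L', List.mem_cons_of_mem _ hL', h1, h2⟩
      · rintro (h | ⟨L', hL', h1, h2⟩)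
        · exact Or.inl (Or.inl h)
        · rcases List.mem_cons.mp hL' with rfl | hL'
          · exact Or.inl (Or.inr h2)
          · exact Or.inr ⟨L', hL', h1, h2⟩
    · rw [if_neg hc, ih]
      constructor
      · rintro (h | ⟨L', hL', h1, h2⟩)
        · exact Or.inl h
        · exact Or.inr ⟨L', List.mem_cons_of_mem _ hL', h1, h2⟩
      · rintro (h | ⟨L', hL', h1, h2⟩)
        · exact Or.inl h
        · rcases List.mem_cons.mp hL' with rfl | hL'
          · exact absurd h1 hc
          · exact Or.inr ⟨L', hL', h1, h2⟩

-- membership in B's full double loop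
theorem pv_mem_hit (words : PySem.Set String) (text : String)
    (is : List Int) (Ls : List Int) (acc : List String) (y : String) :
    y ∈ is.foldl
        (fun h i =>
          Ls.foldl
            (fun h L =>
              let sub := PySem.Str.slice text (some i) (some (i + L))
              if words.contains sub then PySem.Set.add h sub else h)
            h)
        acc
    ↔ y ∈ acc ∨ ∃ i ∈ is, ∃ L ∈ Ls,
          words.contains (PySem.Str.slice text (some i) (some (i + L))) = true
          ∧ y = PySem.Str.slice text (some i) (some (i + L)) := by
  induction is generalizing acc with
  | nil => simp
  | cons i is ih =>
    simp only [List.foldl_cons]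
    rw [ih]
    constructor
    · rintro (h | ⟨i', hi', rest⟩)
      · rcases (pv_mem_inner words text i Ls acc y).mp h with h | ⟨L, hL, h1, h2⟩
        · exact Or.inl h
        · exact Or.inr ⟨i, List.mem_cons_self, L, hL, h1, h2⟩
      · exact Or.inr ⟨i', List.mem_cons_of_mem _ hi', rest⟩
    · rintro (h | ⟨i', hi', L, hL, h1, h2⟩)
      · exact Or.inl ((pv_mem_inner words text i Ls acc y).mpr (Or.inl h))
      · rcases List.mem_cons.mp hi' with heq | hi'
        · exact Or.inl ((pv_mem_inner words text i Ls acc y).mpr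
            (Or.inr ⟨L, hL, by rwa [heq] at h1, by rwa [heq] at h2⟩))
        · exact Or.inr ⟨i', hi', L, hL, h1, h2⟩

-- a slice [i:i+L] with 0 ≤ i, 0 ≤ L that lands in the (""-free) word set is a substring
theorem pv_slice_isIn (text y : String) (i L : Int) (hi : 0 ≤ i) (hL : 0 ≤ L)
    (hy : y = PySem.Str.slice text (some i) (some (i + L))) :
    PySem.Str.isIn y text = true := by
  rw [PySem.Str.isIn_eq]
  rw [← PySem.Chars.exists_prefix_drop_iff_isIn]
  refine ⟨i.toNat, ?_⟩
  have : y.toList = (text.toList.drop i.toNat).take ((i + L).toNat - i.toNat) := by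
    rw [hy, PySem.Str.toList_slice, PySem.Chars.slice_eq_listSlice,
      PySem.List.slice_toNat text.toList hi (by omega)]
  rw [this]
  exact List.take_prefix _ _
-- if a word occurs in the text, the window at its first occurrence recovers it
theorem pv_isIn_slice (text y : String) (hIn : PySem.Str.isIn y text = true) :
    ∃ i ∈ PySem.List.pyRange 0 (PySem.Str.len text + 1) 1,
      y = PySem.Str.slice text (some i) (some (i + PySem.Str.len y)) := by
  rw [PySem.Str.isIn_eq, ← PySem.Chars.exists_prefix_drop_iff_isIn] at hIn
  obtain ⟨j, hj⟩ := hIn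
  set n := text.toList.length with hn
  have hpre : y.toList <+: text.toList.drop (min j n) := by
    by_cases h : j ≤ n
    · simpa [min_eq_left h] using hj
    · have : text.toList.drop j = [] := List.drop_eq_nil_of_le (by omega)
      rw [this] at hj
      have : y.toList = [] := List.prefix_nil.mp hj
      simp [this]
  refine ⟨((min j n : Nat) : Int), ?_, ?_⟩
  · rw [PySem.List.mem_pyRange_one]
    constructor
    · positivity
    · rw [PySem.Str.len_eq]
      have : min j n ≤ n := min_le_right _ _
      push_cast
      omega
  · apply String.toList_inj.mp
    rw [PySem.Str.toList_slice, PySem.Chars.slice_eq_listSlice, PySem.Str.len_eq,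
      PySem.List.slice_natCast_add]
    exact List.prefix_iff_eq_take.mp hpre

-- every length in B's length set is a nonnegative word length
theorem pv_lengths_nonneg (ws : List String) (L : Int)
    (hL : L ∈ PySem.Set.ofList (ws.map PySem.Str.len)) : 0 ≤ L := by
  rw [PySem.Set.mem_ofList, List.mem_map] at hL
  obtain ⟨w, _, rfl⟩ := hL
  rw [PySem.Str.len_eq]
  positivity

-- B's sliding-window score equals A's per-word count
theorem pv_score_eq (assertion : String) (seg : List (String × String)) :
    pvScoreB (PySem.Set.discard (pvWords assertion) "")
      (PySem.Set.ofList ((PySem.Set.discard (pvWords assertion) "").map PySem.Str.len)) seg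
    = pvKey assertion seg := by
  set words := PySem.Set.discard (pvWords assertion) "" with hwords
  set lengths := PySem.Set.ofList (words.map PySem.Str.len) with hlengths
  set text := pvTextOf seg with htext
  have hnodupW : words.Nodup := PySem.Set.nodup_discard _ _ (PySem.Set.nodup_ofList _)
  have hno_empty : ("" : String) ∉ words := by
    intro h
    rw [hwords] at h
    have := List.of_mem_filter (p := fun y => !(y == "")) h
    simp at this
  -- hit has exactly the members of words that occur in text
  set hit := (PySem.List.pyRange 0 (PySem.Str.len text + 1) 1).foldl
      (fun h i =>
        lengths.foldl
          (fun h L =>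
            let sub := PySem.Str.slice text (some i) (some (i + L))
            if words.contains sub then PySem.Set.add h sub else h)
          h)
      PySem.Set.empty with hhit
  have hnodup : hit.Nodup := by
    rw [hhit]
    apply pv_foldl_nodup _ _ _ _ List.nodup_nil
    intro acc i hacc
    apply pv_foldl_nodup _ _ _ _ hacc
    intro acc' L hacc'
    dsimp only
    split_ifs
    · exact PySem.Set.nodup_add _ _ hacc'
    · exact hacc'
  have hmem : ∀ y, y ∈ hit ↔ y ∈ words.filter (fun w => PySem.Str.isIn w text) := by
    intro y
    rw [hhit, pv_mem_hit, List.mem_filter]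
    constructor
    · rintro (h | ⟨i, hi, L, hL, h1, h2⟩)
      · exact absurd h (List.not_mem_nil)
      · rw [PySem.List.mem_pyRange_one] at hi
        refine ⟨?_, pv_slice_isIn text y i L hi.1 (pv_lengths_nonneg _ _ hL) h2⟩
        rw [← h2] at h1
        exact (PySem.Set.contains_iff _ _).mp h1
    · rintro ⟨hyw, hyin⟩
      obtain ⟨i, hi, hslice⟩ := pv_isIn_slice text y hyin
      refine Or.inr ⟨i, hi, PySem.Str.len y, ?_, ?_, hslice⟩
      · rw [hlengths, PySem.Set.mem_ofList]
        exact List.mem_map.mpr ⟨y, hyw, rfl⟩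
      · rw [← hslice]
        exact (PySem.Set.contains_iff _ _).mpr hyw
  have hperm : hit.Perm (words.filter (fun w => PySem.Str.isIn w text)) :=
    (List.perm_ext_iff_of_nodup hnodup (List.Nodup.filter _ hnodupW)).mpr hmem
  show ((hit.length : Nat) : Int) = pvKey assertion seg
  rw [hperm.length_eq, ← List.countP_eq_length_filter]
  unfold pvKey
  rw [← htext, ← pv_count_discard, hwords]

-- the shared "keep the first strictly-best element" scan, as a function
def pvPick {α : Type} (key : α → Int) (b : α) : List α → α
  | [] => b
  | x :: xs => pvPick key (if key x > key b then x else b) xs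

theorem pv_loopA {α : Type} (key : α → Int) (rest : List α) (b : α) :
    rest.foldl (fun st x => if key x > st.2 then (some x, key x) else st) (some b, key b)
    = (some (pvPick key b rest), key (pvPick key b rest)) := by
  induction rest generalizing b with
  | nil => simp [pvPick]
  | cons x xs ih =>
    simp only [List.foldl_cons, pvPick]
    by_cases h : key x > key b
    · simpa [h] using ih x
    · simpa [h] using ih b

-- PySem.List.max? is the same scan
theorem pv_max?_go {α : Type} (key : α → Int) (rest : List α) (b : α) :
    rest.foldl
        (fun acc x =>
          match acc with
          | none => some x
          | some m => if key m < key x then some x else some m)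
        (some b)
    = some (pvPick key b rest) := by
  induction rest generalizing b with
  | nil => simp [pvPick]
  | cons x xs ih =>
    simp only [List.foldl_cons, pvPick]
    by_cases h : key b < key x
    · simpa [h, gt_iff_lt] using ih x
    · simpa [h, gt_iff_lt] using ih b

theorem pv_max?_cons {α : Type} (key : α → Int) (s0 : α) (rest : List α) :
    PySem.List.max? (s0 :: rest) key = some (pvPick key s0 rest) := by
  show (s0 :: rest).foldl
      (fun acc x =>
        match acc with
        | none => some x
        | some m => if key m < key x then some x else some m)
      none = some (pvPick key s0 rest)
  rw [List.foldl_cons]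
  exact pv_max?_go key rest s0

-- A on a nonempty list: the loop keeps the first strictly-best segment
theorem pv_A_eq (assertion : String) (s0 : List (String × String)) (rest : List (List (String × String))) :
    segment_match_py assertion (s0 :: rest)
    = (if (pvPick (pvKey assertion) s0 rest).isEmpty then some s0
       else some (pvPick (pvKey assertion) s0 rest)) := by
  show (if (s0 :: rest).isEmpty then none
    else
      let st : Option (List (String × String)) × Int :=
        (s0 :: rest).foldl
          (fun st seg => if pvKey assertion seg > st.2 then (some seg, pvKey assertion seg) else st)
          (none, -1)
      match st.1 with
      | some b => if b.isEmpty then some (PySem.List.pyGetD (s0 :: rest) 0 []) else some b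
      | none => some (PySem.List.pyGetD (s0 :: rest) 0 [])) = _
  rw [if_neg (by simp)]
  have h0 : pvKey assertion s0 > (((none : Option (List (String × String))), (-1 : Int))).2 := by
    unfold pvKey; simp only []; omega
  simp only [List.foldl_cons, if_pos h0, pv_loopA]
  simp [PySem.List.pyGetD_ofNat']

-- B on a nonempty list computes the same pick
theorem pv_B_eq (assertion : String) (s0 : List (String × String)) (rest : List (List (String × String))) :
    segment_match_py_alt assertion (s0 :: rest)
    = (if (pvPick (pvKey assertion) s0 rest).isEmpty then some s0
       else some (pvPick (pvKey assertion) s0 rest)) := by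
  unfold segment_match_py_alt
  rw [if_neg (by simp)]
  have hkey : pvScoreB (PySem.Set.discard (pvWords assertion) "")
      (PySem.Set.ofList ((PySem.Set.discard (pvWords assertion) "").map PySem.Str.len))
      = pvKey assertion := funext (pv_score_eq assertion)
  simp only [hkey, pv_max?_cons, PySem.List.pyGetD_ofNat', List.getD_cons_zero]

-- ===== VERDICT (by name: the statement is the Claim_ definition above) =====
theorem segment_match_py_spec : Claim_equal_segment_match_py := by
  intro assertion segments _
  unfold Spec_segment_match_py
  cases segments with
  | nil => rfl
  | cons s0 rest => rw [pv_A_eq, pv_B_eq]
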